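-- pv_equiv track=rewrite | github.com/BeamlakTesfahun/Competitive-Programming | Student_that_will_replace_chalk.py | chalkReplacer
-- ===== SOURCE A (Python) =====
-- from typing import List
--
-- def chalkReplacer(chalk: List[int], k: int) -> int:
--     sum1 = sum(chalk)
--     max1 = k%sum1
--     current = chalk[0]
--     i = 0
--     while (i < len(chalk)):
--         if max1 - chalk[i] >= 0:
--             max1-= chalk[i]
--         else:
--             return i
--         i+=1
--     return i
-- ===== SOURCE B (Python) =====
-- from typing import List
--
-- def chalkReplacer(chalk: List[int], k: int) -> int:
--     rem = k % sum(chalk)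
--     prefix = []
--     total = 0
--     for c in chalk:
--         total += c
--         prefix.append(total)
--     for i, p in enumerate(prefix):
--         if p > rem:
--             return i
--     return len(chalk)
-- ===== Notes on version B (the rewrite author's own statement) =====
-- stated objective: alternative
-- what changed: Replaces A's destructive while-loop that repeatedly subtracts from the remainder with a prefix-sum table built once and a threshold search for the first cumulative sum exceeding k % total.
import Mathlib
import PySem

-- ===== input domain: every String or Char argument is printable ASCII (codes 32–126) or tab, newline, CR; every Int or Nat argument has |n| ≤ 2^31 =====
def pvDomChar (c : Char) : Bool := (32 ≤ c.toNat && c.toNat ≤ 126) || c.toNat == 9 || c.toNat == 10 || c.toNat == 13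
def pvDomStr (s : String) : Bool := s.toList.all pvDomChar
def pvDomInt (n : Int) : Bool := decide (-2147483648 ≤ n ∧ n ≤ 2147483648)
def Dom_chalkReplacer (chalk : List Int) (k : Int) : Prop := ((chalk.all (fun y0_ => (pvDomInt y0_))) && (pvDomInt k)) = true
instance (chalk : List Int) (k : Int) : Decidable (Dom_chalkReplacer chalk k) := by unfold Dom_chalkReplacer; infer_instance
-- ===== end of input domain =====

-- B replaces A's destructive subtract-and-test while-loop by a prefix-sum table plus a
-- threshold search (first cumulative sum exceeding k % total); same O(n) cost.

-- ===== PORT A =====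
-- A's while-loop: state is the remaining amount max1 and the index i.
def pvLoopA : List Int → Int → Int → Int
  | [], _, i => i
  | c :: rest, m, i => if m - c ≥ 0 then pvLoopA rest (m - c) (i + 1) else i

def chalkReplacer (chalk : List Int) (k : Int) : Int :=
  let sum1 := chalk.sum
  let max1 := PySem.Int.mod k sum1
  let _current := PySem.List.pyGet? chalk 0   -- A's unused 'current = chalk[0]'
  pvLoopA chalk max1 0

-- ===== PORT B =====
-- prefix-sum table: running total t, emit t+c for each element.
def pvPrefix : List Int → Int → List Int
  | [], _ => []
  | c :: rest, t => (t + c) :: pvPrefix rest (t + c)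

-- first index whose table entry exceeds rem; falls off the end with the length.
def pvSearch : List Int → Int → Int → Int
  | [], _, i => i
  | p :: rest, rem, i => if p > rem then i else pvSearch rest rem (i + 1)

def chalkReplacer_alt (chalk : List Int) (k : Int) : Int :=
  let rem := PySem.Int.mod k chalk.sum
  pvSearch (pvPrefix chalk 0) rem 0

-- ===== PRECONDITION & SPEC =====
-- Python A raises ZeroDivisionError at 'k % sum(chalk)' when the sum is 0 (in particular on []).
def Pre_chalkReplacer (chalk : List Int) (k : Int) : Prop := chalk.sum ≠ 0
instance (chalk : List Int) (k : Int) : Decidable (Pre_chalkReplacer chalk k) := by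
  unfold Pre_chalkReplacer; infer_instance
def pvWitness_chalkReplacer : List Int × Int := ([5, 1, 5], 22)

def Spec_chalkReplacer (chalk : List Int) (k : Int) (out : Int) : Prop := out = chalkReplacer_alt chalk k
instance (chalk : List Int) (k : Int) (out : Int) : Decidable (Spec_chalkReplacer chalk k out) := by
  unfold Spec_chalkReplacer; infer_instance

-- ===== CLAIM (what is proved, stated in full; the proofs are below) =====
def Claim_equal_chalkReplacer : Prop := ∀ (chalk : List Int) (k : Int), Dom_chalkReplacer chalk k → Pre_chalkReplacer chalk k → Spec_chalkReplacer chalk k (chalkReplacer chalk k)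

-- ===== LEMMAS AND PROOFS =====
-- A's loop state m equals rem minus the prefix already consumed; relating it to B's
-- table shifted by that consumed prefix t makes the two recursions line up.
theorem pvLoopA_eq_search (chalk : List Int) :
    ∀ (m t i : Int), pvLoopA chalk m i = pvSearch (pvPrefix chalk t) (m + t) i := by
  induction chalk with
  | nil => intro m t i; rfl
  | cons c rest ih =>
    intro m t i
    simp only [pvLoopA, pvPrefix, pvSearch]
    have hcond : (t + c > m + t) = ¬ (m - c ≥ 0) := by
      simp; constructor <;> intro h <;> omega
    by_cases h : m - c ≥ 0
    · rw [if_pos h, if_neg (by omega : ¬ t + c > m + t)]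
      have := ih (m - c) (t + c) (i + 1)
      simpa [show m - c + (t + c) = m + t by ring] using this
    · rw [if_neg h, if_pos (by omega : t + c > m + t)]

-- ===== VERDICT (by name: the statement is the Claim_ definition above) =====
theorem chalkReplacer_spec : Claim_equal_chalkReplacer := by
  intro chalk k _hdom _hpre
  unfold Spec_chalkReplacer chalkReplacer chalkReplacer_alt
  simpa using pvLoopA_eq_search chalk (PySem.Int.mod k chalk.sum) 0 0
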